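-- pv_equiv track=rewrite | github.com/pranavishal/NeetCode150 | MinimumWindowSubstring.py | containsCheck
-- ===== SOURCE A (Python) =====
-- def containsCheck(s: str, t: str) -> bool:
--     tMap = {}
--     sMap = {}
--
--     for j in t:
--         if j not in tMap:
--             tMap[j] = 1
--         else:
--             tMap[j] += 1
--
--     for i in s:
--         if i not in sMap:
--             sMap[i] = 1
--         else:
--             sMap[i] += 1
--
--     for key, value in tMap.items():
--         if key not in sMap:
--             return False
--
--         elif value > sMap[key]:
--             return False
--
--     return True
-- ===== SOURCE B (Python) =====
-- def containsCheck(s: str, t: str) -> bool: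
--     remaining = list(s)
--     for c in t:
--         if c in remaining:
--             remaining.remove(c)
--         else:
--             return False
--     return True
-- ===== Notes on version B (the rewrite author's own statement) =====
-- stated objective: alternative
-- what changed: Replaces A's two hash-map frequency counters plus a final comparison loop by a single pass over t that crosses each needed character off a mutable copy of s's characters, returning False as soon as one cannot be found.
import Mathlib
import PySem

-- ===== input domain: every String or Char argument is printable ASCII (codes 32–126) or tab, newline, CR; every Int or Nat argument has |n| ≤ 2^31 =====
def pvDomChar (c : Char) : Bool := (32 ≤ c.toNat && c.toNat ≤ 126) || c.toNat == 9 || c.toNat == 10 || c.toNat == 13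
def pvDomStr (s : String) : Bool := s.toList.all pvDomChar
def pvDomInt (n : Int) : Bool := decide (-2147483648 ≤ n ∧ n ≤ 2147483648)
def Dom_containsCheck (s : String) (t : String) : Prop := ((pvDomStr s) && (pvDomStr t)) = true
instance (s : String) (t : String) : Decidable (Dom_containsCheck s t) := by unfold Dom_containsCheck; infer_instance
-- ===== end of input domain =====

-- B replaces A's two frequency maps and comparison loop by crossing needed characters
-- off a copy of s's character list in one pass over t (objective: alternative).

-- ===== PORT A =====
-- the 'for key, value in tMap.items(): …' loop with its early returns;
-- sMap[key] is read as getD key 0, exact because it is guarded by 'key not in sMap'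
def pvCheckItems (sMap : PySem.Dict Char Int) : List (Char × Int) → Bool
  | [] => true
  | (k, v) :: rest =>
    if !(sMap.contains k) then false
    else if v > sMap.getD k 0 then false
    else pvCheckItems sMap rest

def containsCheck (s : String) (t : String) : Bool :=
  let tMap := t.toList.foldl
    (fun d j => if !(d.contains j) then d.insert j 1 else d.insert j (d.getD j 0 + 1))
    PySem.Dict.empty
  let sMap := s.toList.foldl
    (fun d i => if !(d.contains i) then d.insert i 1 else d.insert i (d.getD i 0 + 1))
    PySem.Dict.empty
  pvCheckItems sMap tMap.items

-- ===== PORT B =====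
-- 'for c in t: if c in remaining: remaining.remove(c) else: return False'
def pvRemoveLoop (remaining : List Char) : List Char → Bool
  | [] => true
  | c :: rest =>
    if remaining.contains c then
      match PySem.List.remove? remaining c with
      | some rem' => pvRemoveLoop rem' rest
      | none => false
    else false

def containsCheck_alt (s : String) (t : String) : Bool :=
  pvRemoveLoop s.toList t.toList

-- ===== PRECONDITION & SPEC =====
def Spec_containsCheck (s : String) (t : String) (out : Bool) : Prop := out = containsCheck_alt s t
instance (s : String) (t : String) (out : Bool) : Decidable (Spec_containsCheck s t out) := by unfold Spec_containsCheck; infer_instance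

-- ===== CLAIM (what is proved, stated in full; the proofs are below) =====
def Claim_equal_containsCheck : Prop := ∀ (s : String) (t : String), Dom_containsCheck s t → Spec_containsCheck s t (containsCheck s t)

-- ===== LEMMAS AND PROOFS =====

-- A's counter-building loop is collections.Counter
theorem pvFold_eq_counter (xs : List Char) :
    xs.foldl (fun d j => if !(d.contains j) then d.insert j 1 else d.insert j (d.getD j 0 + 1))
      PySem.Dict.empty = PySem.Dict.counter xs := by
  have hfun : (fun (d : PySem.Dict Char Int) j =>
      if !(d.contains j) then d.insert j 1 else d.insert j (d.getD j 0 + 1))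
      = (fun d x => d.insert x (d.getD x 0 + 1)) := by
    funext d j
    by_cases h : d.contains j = true
    · simp [h]
    · simp only [Bool.not_eq_true] at h
      simp [h, PySem.Dict.getD_of_not_contains d 0 h]
  rw [hfun, PySem.Dict.foldl_insert_getD_add_one_eq_counter]

theorem pvCheckItems_eq_all (sMap : PySem.Dict Char Int) (l : List (Char × Int)) :
    pvCheckItems sMap l
      = l.all (fun p => sMap.contains p.1 && decide (p.2 ≤ sMap.getD p.1 0)) := by
  induction l with
  | nil => rfl
  | cons p rest ih =>
    obtain ⟨k, v⟩ := p
    simp only [pvCheckItems, List.all_cons, ih]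
    by_cases h : sMap.contains k = true
    · by_cases hv : v > sMap.getD k 0
      · simp [h, hv]
      · simp [h, hv]
        omega
    · simp only [Bool.not_eq_true] at h
      simp [h]

theorem containsCheck_iff (s t : String) :
    containsCheck s t = true ↔ ∀ c, t.toList.count c ≤ s.toList.count c := by
  unfold containsCheck
  rw [pvFold_eq_counter, pvFold_eq_counter, pvCheckItems_eq_all,
    PySem.Dict.items_counter]
  simp only [List.all_map, List.all_eq_true, Function.comp,
    PySem.Dict.contains_counter, PySem.Dict.getD_counter,
    Bool.and_eq_true, decide_eq_true_eq, List.contains_eq_mem,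
    PySem.Set.mem_ofList, Nat.cast_le]
  constructor
  · intro h c
    by_cases hc : c ∈ t.toList
    · exact (h c hc).2
    · simp [List.count_eq_zero_of_not_mem hc]
  · intro h c hc
    refine ⟨?_, h c⟩
    have h1 : 1 ≤ t.toList.count c := List.one_le_count_iff.mpr hc
    have := h c
    exact List.one_le_count_iff.mp (by omega)

theorem pvRemoveLoop_iff (ts : List Char) : ∀ rem : List Char,
    (pvRemoveLoop rem ts = true ↔ ∀ c, ts.count c ≤ rem.count c) := by
  induction ts with
  | nil => intro rem; simp [pvRemoveLoop]
  | cons c rest ih =>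
    intro rem
    by_cases hc : c ∈ rem
    · have herase : PySem.List.remove? rem c = some (rem.erase c) :=
        PySem.List.remove?_eq_some_erase rem c hc
      simp only [pvRemoveLoop, List.contains_eq_mem, hc, decide_true, if_true, herase]
      rw [ih (rem.erase c)]
      have h1 : 1 ≤ rem.count c := List.one_le_count_iff.mpr hc
      constructor
      · intro h x
        have hx := h x
        rw [List.count_cons]
        by_cases hxc : c = x
        · subst hxc
          simp only [List.count_erase_self] at hx
          simp
          omega
        · rw [List.count_erase_of_ne (fun h' => hxc h'.symm)] at hx
          simp [hxc]
          omega
      · intro h x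
        have hx := h x
        rw [List.count_cons] at hx
        by_cases hxc : c = x
        · subst hxc
          simp only [List.count_erase_self]
          simp at hx
          omega
        · rw [List.count_erase_of_ne (fun h' => hxc h'.symm)]
          simp [hxc] at hx
          omega
    · simp only [pvRemoveLoop, List.contains_eq_mem, hc, decide_false]
      constructor
      · intro h; exact absurd h (by simp)
      · intro h
        have := h c
        rw [List.count_cons_self, List.count_eq_zero_of_not_mem hc] at this
        omega

-- ===== VERDICT (by name: the statement is the Claim_ definition above) =====
theorem containsCheck_spec : Claim_equal_containsCheck := by
  intro s t _
  unfold Spec_containsCheck containsCheck_alt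
  have hA := containsCheck_iff s t
  have hB := pvRemoveLoop_iff t.toList s.toList
  rw [Bool.eq_iff_iff, hA, hB]
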